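-- pv_equiv track=rewrite | github.com/Ken1g/InterviewBit | Tasks/greedy/seats.py | seats
-- ===== SOURCE A (Python) =====
-- def seats(A):
-- 	pos = []
-- 	MOD = 10000003
-- 	for idx, el in enumerate(A):
-- 		if el == "x":
-- 			pos.append(idx)
--
-- 	N = len(pos)
-- 	if N == 0:
-- 		return 0
-- 	start = pos[N // 2] - N // 2
-- 	ans = 0
-- 	position = start
-- 	for i in pos:
-- 		ans = (ans + abs(position - i)) % MOD
-- 		position += 1
--
-- 	return ans
-- ===== SOURCE B (Python) =====
-- def seats(A):
--     pos = [i for i, c in enumerate(A) if c == "x"]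
--     if not pos:
--         return 0
--     b = [p - i for i, p in enumerate(pos)]
--     total = 0
--     lo, hi = 0, len(b) - 1
--     while lo < hi:
--         total += b[hi] - b[lo]
--         lo += 1
--         hi -= 1
--     return total % 10000003
-- ===== Notes on version B (the rewrite author's own statement) =====
-- stated objective: alternative
-- what changed: Replaces the median-anchored sweep (pick pos[N//2], walk a moving target position, sum absolute deviations with a per-step mod) by a two-pointer pairing on the shifted array b[i]=pos[i]-i, accumulating b[hi]-b[lo] from the ends inward with a single mod at the end.
import Mathlib
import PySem

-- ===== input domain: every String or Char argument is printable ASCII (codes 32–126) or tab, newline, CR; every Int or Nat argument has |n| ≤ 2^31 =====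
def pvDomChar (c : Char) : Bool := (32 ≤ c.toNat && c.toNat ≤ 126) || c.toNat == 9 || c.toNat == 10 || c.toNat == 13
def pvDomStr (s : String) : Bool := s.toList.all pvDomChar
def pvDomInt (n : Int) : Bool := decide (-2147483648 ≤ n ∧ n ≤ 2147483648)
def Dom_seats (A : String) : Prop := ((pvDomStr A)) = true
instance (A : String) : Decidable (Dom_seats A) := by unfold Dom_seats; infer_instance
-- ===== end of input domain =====

-- B replaces A's median-anchored sweep by a two-pointer pairing on b[i]=pos[i]-i with one final mod (alternative decomposition, same cost).

-- ===== PORT A =====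
def seatsStep (acc : List Int) (p : Int × Char) : List Int :=
  if p.2 = 'x' then acc ++ [p.1] else acc

def seats (A : String) : Int :=
  let pos := (PySem.List.enumerate A.toList).foldl seatsStep []
  let N := pos.length
  if N = 0 then 0
  else
    -- pos[N//2]: N ≥ 1 on this branch, so the index N//2 is in range and plain getD is exact
    let start : Int := pos.getD (N / 2) 0 - ((N / 2 : Nat) : Int)
    (pos.foldl (fun (s : Int × Int) i =>
      (PySem.Int.mod (s.1 + |s.2 - i|) 10000003, s.2 + 1)) (0, start)).1

-- ===== PORT B =====
-- the while-loop 'while lo < hi: total += b[hi] - b[lo]; lo += 1; hi -= 1' of Source B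
def seatsTP (b : List Int) (lo hi : Nat) : Int :=
  if lo < hi then (b.getD hi 0 - b.getD lo 0) + seatsTP b (lo + 1) (hi - 1) else 0
termination_by hi - lo

def seats_alt (A : String) : Int :=
  let pos := ((PySem.List.enumerate A.toList).filter (fun p => p.2 == 'x')).map (·.1)
  if pos = [] then 0
  else
    let b := (PySem.List.enumerate pos).map (fun q => q.2 - q.1)
    PySem.Int.mod (seatsTP b 0 (b.length - 1)) 10000003

-- ===== PRECONDITION & SPEC =====
def Spec_seats (A : String) (out : Int) : Prop := out = seats_alt A
instance (A : String) (out : Int) : Decidable (Spec_seats A out) := by unfold Spec_seats; infer_instance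

-- ===== CLAIM (what is proved, stated in full; the proofs are below) =====
def Claim_equal_seats : Prop := ∀ (A : String), Dom_seats A → Spec_seats A (seats A)

-- ===== LEMMAS AND PROOFS =====

-- A's position-collecting fold is B's filter-map
theorem seats_fold_filter (l : List (Int × Char)) (acc : List Int) :
    l.foldl seatsStep acc = acc ++ (l.filter (fun p => p.2 == 'x')).map (·.1) := by
  induction l generalizing acc with
  | nil => simp
  | cons x xs ih =>
    simp only [List.foldl_cons, seatsStep, List.filter_cons]
    by_cases h : x.2 = 'x' <;> simp [h, ih, List.append_assoc]

-- recursive sum matching A's sweep: Σ |p + k - pos[k]|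
def sumAbs (p : Int) : List Int → Int
  | [] => 0
  | x :: xs => |p - x| + sumAbs (p + 1) xs

theorem mod_mod_add (a t : Int) :
    PySem.Int.mod (PySem.Int.mod a 10000003 + t) 10000003 = PySem.Int.mod (a + t) 10000003 := by
  rw [PySem.Int.mod_eq_emod_of_pos (by norm_num), PySem.Int.mod_eq_emod_of_pos (by norm_num),
    PySem.Int.mod_eq_emod_of_pos (by norm_num), Int.emod_add_emod]

theorem seats_foldA (xs : List Int) (a p : Int) :
    (xs.foldl (fun (s : Int × Int) i =>
      (PySem.Int.mod (s.1 + |s.2 - i|) 10000003, s.2 + 1)) (PySem.Int.mod a 10000003, p)).1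
    = PySem.Int.mod (a + sumAbs p xs) 10000003 := by
  induction xs generalizing a p with
  | nil => simp [sumAbs]
  | cons x xs ih =>
    simp only [List.foldl_cons, mod_mod_add]
    rw [ih (a + |p - x|) (p + 1)]
    simp [sumAbs, add_assoc]

theorem sumAbs_eq_sum (xs : List Int) (p : Int) :
    sumAbs p xs = ∑ k ∈ Finset.range xs.length, |p + (k : Int) - xs.getD k 0| := by
  induction xs generalizing p with
  | nil => simp [sumAbs]
  | cons x xs ih =>
    rw [List.length_cons, Finset.sum_range_succ']
    simp only [List.getD_cons_succ, List.getD_cons_zero]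
    push_cast
    rw [show ∀ S : Int, S + |p + 0 - x| = |p - x| + S by intro S; rw [add_comm]; ring_nf]
    rw [sumAbs, ih (p + 1)]
    congr 1
    apply Finset.sum_congr rfl
    intro k _
    congr 1
    ring

-- seatsTP as a Finset sum of end pairs
theorem seatsTP_eq_sum (b : List Int) (lo hi : Nat) :
    seatsTP b lo hi = ∑ k ∈ Finset.range ((hi + 1 - lo) / 2), (b.getD (hi - k) 0 - b.getD (lo + k) 0) := by
  induction lo, hi using seatsTP.induct with
  | case1 lo hi h ih =>
    rw [seatsTP, if_pos h, ih]
    have hn : (hi + 1 - lo) / 2 = (hi - 1 + 1 - (lo + 1)) / 2 + 1 := by omega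
    rw [hn, Finset.sum_range_succ']
    simp only [Nat.sub_zero, Nat.add_zero]
    rw [add_comm]
    congr 1
    apply Finset.sum_congr rfl
    intro k _
    congr 2 <;> omega
  | case2 lo hi h =>
    rw [seatsTP, if_neg h]
    have : (hi + 1 - lo) / 2 = 0 := by omega
    simp [this]

-- reindex the hi-side sum
theorem sum_reflect (g : Nat → Int) (N K : Nat) (hK : K ≤ N) :
    ∑ k ∈ Finset.range K, g (N - 1 - k) = ∑ i ∈ Finset.Ico (N - K) N, g i := by
  induction K with
  | zero => simp
  | succ K ih =>
    rw [Finset.sum_range_succ, ih (by omega)]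
    rw [show (∑ i ∈ Finset.Ico (N - (K + 1)) N, g i)
        = g (N - (K + 1)) + ∑ i ∈ Finset.Ico (N - (K + 1) + 1) N, g i from
      Finset.sum_eq_sum_Ico_succ_bot (by omega) g]
    rw [show N - (K + 1) + 1 = N - K by omega, show N - 1 - K = N - (K + 1) by omega]
    ring

-- the central pairing identity on a sorted-by-index sequence
theorem pairing_identity (g : Nat → Int) (N : Nat) (hN : 1 ≤ N)
    (hmono : ∀ i j, i ≤ j → j < N → g i ≤ g j) :
    ∑ i ∈ Finset.range N, |g (N / 2) - g i|
      = ∑ k ∈ Finset.range (N / 2), (g (N - 1 - k) - g k) := by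
  obtain ⟨m, hm⟩ : ∃ m, m = N / 2 := ⟨N / 2, rfl⟩
  rw [← hm]
  have hmN : m < N := by omega
  have habs : ∑ i ∈ Finset.range N, |g m - g i|
      = ∑ i ∈ Finset.range N, (if i ≤ m then g m - g i else g i - g m) := by
    refine Finset.sum_congr rfl ?_
    intro i hi
    simp only [Finset.mem_range] at hi
    by_cases hic : i ≤ m
    · rw [if_pos hic, abs_of_nonneg (by linarith [hmono i m hic hmN])]
    · rw [if_neg hic, abs_of_nonpos (by linarith [hmono m i (by omega) hi]), neg_sub]
  rw [habs]
  have hsplit : ∑ i ∈ Finset.range N, (if i ≤ m then g m - g i else g i - g m)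
      = (∑ i ∈ Finset.range (m + 1), (g m - g i)) + ∑ i ∈ Finset.Ico (m + 1) N, (g i - g m) := by
    rw [Finset.range_eq_Ico,
      ← Finset.sum_Ico_consecutive _ (by omega : 0 ≤ m + 1) (by omega : m + 1 ≤ N),
      ← Finset.range_eq_Ico]
    congr 1
    · refine Finset.sum_congr rfl ?_
      intro i hi; simp only [Finset.mem_range] at hi; rw [if_pos (by omega)]
    · refine Finset.sum_congr rfl ?_
      intro i hi; simp only [Finset.mem_Ico] at hi; rw [if_neg (by omega)]
  rw [hsplit]
  have hrhs : ∑ k ∈ Finset.range m, (g (N - 1 - k) - g k)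
      = (∑ i ∈ Finset.Ico (N - m) N, g i) - ∑ k ∈ Finset.range m, g k := by
    rw [Finset.sum_sub_distrib, sum_reflect g N m (by omega)]
  rw [hrhs]
  rw [Finset.sum_sub_distrib, Finset.sum_sub_distrib, Finset.sum_const, Finset.sum_const,
    Finset.card_range, Nat.card_Ico, nsmul_eq_mul, nsmul_eq_mul, Finset.sum_range_succ]
  rcases (by omega : N = 2 * m ∨ N = 2 * m + 1) with h2 | h2
  · have hm1 : 1 ≤ m := by omega
    rw [show (∑ i ∈ Finset.Ico (N - m) N, g i)
        = g (N - m) + ∑ i ∈ Finset.Ico (N - m + 1) N, g i from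
      Finset.sum_eq_sum_Ico_succ_bot (by omega) g]
    rw [show N - m = m by omega]
    rw [show ((N - (m + 1) : ℕ) : ℤ) = (m : ℤ) - 1 by omega,
      show ((m + 1 : ℕ) : ℤ) = (m : ℤ) + 1 by omega]
    ring
  · rw [show N - m = m + 1 by omega]
    rw [show ((N - (m + 1) : ℕ) : ℤ) = (m : ℤ) by omega,
      show ((m + 1 : ℕ) : ℤ) = (m : ℤ) + 1 by omega]
    ring

-- b is pos shifted: b.getD k 0 = pos.getD k 0 - k for k < length
theorem b_getD (pos : List Int) (k : Nat) (hk : k < pos.length) :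
    ((PySem.List.enumerate pos).map (fun q => q.2 - q.1)).getD k 0 = pos.getD k 0 - (k : Int) := by
  have hlen : ((PySem.List.enumerate pos).map (fun q => q.2 - q.1)).length = pos.length := by
    simp [PySem.List.length_enumerate]
  rw [List.getD_eq_getElem _ _ (by omega), List.getElem_map, PySem.List.getElem_enumerate,
    List.getD_eq_getElem _ _ hk]
  simp

theorem b_mono (pos : List Int) (hp : pos.Pairwise (· < ·)) :
    ∀ i j, i ≤ j → j < pos.length →
      pos.getD i 0 - (i : Int) ≤ pos.getD j 0 - (j : Int) := by
  have hadj : ∀ i, i + 1 < pos.length → pos.getD i 0 + 1 ≤ pos.getD (i + 1) 0 := by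
    intro i hi
    have h := (List.pairwise_iff_getElem.mp hp) i (i + 1) (by omega) hi (by omega)
    rw [List.getD_eq_getElem _ _ (by omega), List.getD_eq_getElem _ _ hi]
    omega
  have aux : ∀ d i, i + d < pos.length →
      pos.getD i 0 - (i : Int) ≤ pos.getD (i + d) 0 - ((i + d : Nat) : Int) := by
    intro d
    induction d with
    | zero => intro i h; simp
    | succ d ih =>
      intro i h
      have h1 := ih i (by omega)
      have h2 := hadj (i + d) (by omega)
      rw [show i + (d + 1) = (i + d) + 1 by omega]
      push_cast at h1 ⊢
      omega
  intro i j hij hj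
  have h := aux (j - i) i (by omega)
  rw [show i + (j - i) = j by omega] at h
  exact h

-- ===== VERDICT (by name: the statement is the Claim_ definition above) =====
theorem getD_eq_g (pos : List Int) (j : Nat) (hj : j < pos.length) :
    ((PySem.List.enumerate pos).map (fun q => q.2 - q.1)).getD j 0
      = (fun k : Nat => pos.getD k 0 - (k : Int)) j := b_getD pos j hj

theorem seats_spec : Claim_equal_seats := by
  intro A _
  show seats A = seats_alt A
  simp only [seats, seats_alt]
  rw [seats_fold_filter, List.nil_append]
  set pos := ((PySem.List.enumerate A.toList).filter (fun p => p.2 == 'x')).map (·.1) with hposdef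
  by_cases hnil : pos = []
  · simp [hnil]
  · have hN : 1 ≤ pos.length := List.length_pos_iff.mpr hnil
    rw [if_neg (by omega : ¬ pos.length = 0), if_neg hnil]
    set g : Nat → Int := fun k => pos.getD k 0 - (k : Int) with hg
    set m := pos.length / 2 with hmdef
    -- A side
    have h0 : PySem.Int.mod 0 10000003 = (0 : Int) := by
      rw [PySem.Int.mod_eq_emod_of_pos (by norm_num)]; exact Int.zero_emod _
    have hA := seats_foldA pos 0 (pos.getD (pos.length / 2) 0 - ((pos.length / 2 : Nat) : Int))
    rw [h0] at hA
    rw [hA, zero_add, sumAbs_eq_sum]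
    have hAterm : ∑ k ∈ Finset.range pos.length,
        |pos.getD (pos.length / 2) 0 - ((pos.length / 2 : Nat) : Int) + (k : Int) - pos.getD k 0|
        = ∑ i ∈ Finset.range pos.length, |g m - g i| := by
      refine Finset.sum_congr rfl ?_
      intro k _
      congr 1
      simp only [hg, hmdef]
      ring
    rw [hAterm]
    -- B side
    have hblen : ((PySem.List.enumerate pos).map (fun q => q.2 - q.1)).length = pos.length := by
      simp [PySem.List.length_enumerate]
    rw [hblen, seatsTP_eq_sum]
    have hBterm : ∑ k ∈ Finset.range ((pos.length - 1 + 1 - 0) / 2),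
        (((PySem.List.enumerate pos).map (fun q => q.2 - q.1)).getD (pos.length - 1 - k) 0
          - ((PySem.List.enumerate pos).map (fun q => q.2 - q.1)).getD (0 + k) 0)
        = ∑ k ∈ Finset.range m, (g (pos.length - 1 - k) - g k) := by
      rw [show (pos.length - 1 + 1 - 0) / 2 = m by omega]
      refine Finset.sum_congr rfl ?_
      intro k hk
      simp only [Finset.mem_range] at hk
      rw [Nat.zero_add, getD_eq_g pos (pos.length - 1 - k) (by omega),
        getD_eq_g pos k (by omega)]
    rw [hBterm]
    congr 1
    rw [hmdef]
    exact pairing_identity g pos.length hN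
      (fun i j hij hj => b_mono pos (by
        rw [hposdef, List.pairwise_map]
        exact (PySem.List.pairwise_lt_enumerate A.toList 0).filter
          (fun p => p.2 == 'x')) i j hij hj)
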